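-- pv_equiv track=rewrite | github.com/Elian-Abrao/argus | ai/src/agent/chat.py | is_codex_usage_limit_error
-- ===== SOURCE A (Python) =====
-- def is_codex_usage_limit_error(exc: Exception | str) -> bool:
--     text = str(exc).lower()
--     patterns = (
--         "rate limit",
--         "rate-limit",
--         "quota",
--         "usage limit",
--         "too many requests",
--         "429",
--         "limit reached",
--         "exceeded your current quota",
--     )
--     return any(pattern in text for pattern in patterns)
-- ===== SOURCE B (Python) =====
-- def is_codex_usage_limit_error(exc) -> bool:
--     # First-character dispatch: build a hash index from first character to the
--     # patterns starting with it, then make ONE pass over the text; at each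
--     # position only the (few) patterns whose first character matches are even
--     # considered, so the eight independent full-text searches disappear.
--     patterns = (
--         "rate limit",
--         "rate-limit",
--         "quota",
--         "usage limit",
--         "too many requests",
--         "429",
--         "limit reached",
--         "exceeded your current quota",
--     )
--     by_first = {}
--     for p in patterns:
--         by_first.setdefault(p[0], []).append(p)
--     text = str(exc).lower()
--     for i in range(len(text)):
--         for p in by_first.get(text[i], ()):
--             if text[i:i + len(p)] == p:
--                 return True
--     return False
-- ===== Notes on version B (the rewrite author's own statement) =====
-- stated objective: alternative
-- what changed: Replaces eight independent full-text substring searches ('pattern in text' per pattern) with a hash index from first character to candidate patterns and a single left-to-right pass over the text that only tries patterns whose first character matches the current position.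
import Mathlib
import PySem

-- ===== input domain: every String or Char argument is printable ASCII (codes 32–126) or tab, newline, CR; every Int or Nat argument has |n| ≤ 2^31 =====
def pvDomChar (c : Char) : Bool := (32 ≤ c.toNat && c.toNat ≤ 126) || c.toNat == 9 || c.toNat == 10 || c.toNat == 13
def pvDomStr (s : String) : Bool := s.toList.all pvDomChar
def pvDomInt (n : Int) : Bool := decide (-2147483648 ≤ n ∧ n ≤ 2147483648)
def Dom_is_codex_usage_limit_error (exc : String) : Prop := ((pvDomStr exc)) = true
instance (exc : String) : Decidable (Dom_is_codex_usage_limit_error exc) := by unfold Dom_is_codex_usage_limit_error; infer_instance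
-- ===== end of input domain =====

-- B replaces A's eight independent full-text substring searches with a first-character
-- dispatch index and one left-to-right pass over the text (objective: alternative).

-- ===== PORT A =====
def is_codex_usage_limit_error (exc : String) : Bool :=
  let text := PySem.Str.lower exc
  (["rate limit", "rate-limit", "quota", "usage limit", "too many requests",
    "429", "limit reached", "exceeded your current quota"] : List String).any
    (fun pattern => PySem.Str.isIn pattern text)

-- ===== PORT B =====
-- the eight patterns, as character lists
def pvPatterns : List (List Char) :=
  ["rate limit".toList, "rate-limit".toList, "quota".toList, "usage limit".toList,
   "too many requests".toList, "429".toList, "limit reached".toList,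
   "exceeded your current quota".toList]

-- by_first: the loop 'for p in patterns: by_first.setdefault(p[0], []).append(p)'.
-- Every pattern is nonempty, so p[0] is its head; headD makes the Lean term total.
def pvByFirst : PySem.Dict Char (List (List Char)) :=
  (pvPatterns.map (fun p => (p.headD ' ', p))).foldl
    (fun d q => d.modify q.1 [] (fun l => l ++ [q.2])) PySem.Dict.empty

-- the single pass: 'for i in range(len(text)): for p in by_first.get(text[i], ()): if text[i:i+len(p)] == p'.
-- text[i] is always in range inside the loop, so List.getD is exact there.
def is_codex_usage_limit_error_alt (exc : String) : Bool :=
  let text := (PySem.Str.lower exc).toList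
  (List.range text.length).any (fun i =>
    (pvByFirst.getD (text.getD i ' ') []).any (fun p =>
      PySem.List.slice text (some (i : Int)) (some ((i : Int) + (p.length : Int))) == p))

-- ===== PRECONDITION & SPEC =====
def Spec_is_codex_usage_limit_error (exc : String) (out : Bool) : Prop := out = is_codex_usage_limit_error_alt exc
instance (exc : String) (out : Bool) : Decidable (Spec_is_codex_usage_limit_error exc out) := by unfold Spec_is_codex_usage_limit_error; infer_instance

-- ===== CLAIM (what is proved, stated in full; the proofs are below) =====
def Claim_equal_is_codex_usage_limit_error : Prop := ∀ (exc : String), Dom_is_codex_usage_limit_error exc → Spec_is_codex_usage_limit_error exc (is_codex_usage_limit_error exc)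

-- ===== LEMMAS AND PROOFS =====

-- what the dispatch index stores under a character: exactly the patterns whose head it is
-- what the dispatch index stores under a character: exactly the patterns whose head it is
theorem pvByFirst_getD (c : Char) (p : List Char) :
    p ∈ pvByFirst.getD c [] ↔ p ∈ pvPatterns ∧ p.headD ' ' = c := by
  unfold pvByFirst
  rw [PySem.Dict.getD_foldl_modify_append]
  simp [List.mem_filter, List.mem_map]

-- the inner test is the prefix relation at position i
theorem pv_slice_eq_iff (t p : List Char) (i : ℕ) :
    (PySem.List.slice t (some (i : Int)) (some ((i : Int) + (p.length : Int))) == p) = true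
      ↔ p <+: t.drop i := by
  rw [PySem.List.slice_natCast_add, beq_iff_eq, List.prefix_iff_eq_take, eq_comm]

-- ===== VERDICT (by name: the statement is the Claim_ definition above) =====
theorem is_codex_usage_limit_error_spec : Claim_equal_is_codex_usage_limit_error := by
  intro exc _
  unfold Spec_is_codex_usage_limit_error is_codex_usage_limit_error is_codex_usage_limit_error_alt
  rw [Bool.eq_iff_iff]
  set t : List Char := (PySem.Str.lower exc).toList with ht
  simp only [List.any_eq_true, List.mem_range, pvByFirst_getD, pv_slice_eq_iff,
    PySem.Str.isIn_iff_infix, ← ht]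
  constructor
  · rintro ⟨s, hs, hin⟩
    obtain ⟨i, hpre⟩ := PySem.Chars.exists_prefix_drop_iff_isIn s.toList t |>.mpr
      (by rw [PySem.Chars.isIn_iff_infix]; exact hin)
    simp only [List.mem_cons, List.not_mem_nil, or_false] at hs
    have hne : s.toList ≠ [] := by
      rcases hs with rfl|rfl|rfl|rfl|rfl|rfl|rfl|rfl <;> decide
    have hmem : s.toList ∈ pvPatterns := by
      rcases hs with rfl|rfl|rfl|rfl|rfl|rfl|rfl|rfl <;> simp [pvPatterns]
    have hi : i < t.length := by
      by_contra h
      rw [List.drop_eq_nil_of_le (by omega)] at hpre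
      exact hne (List.prefix_nil.mp hpre)
    obtain ⟨c, cs, hc⟩ := List.exists_cons_of_ne_nil hne
    have hhead : t.getD i ' ' = c := by
      obtain ⟨r, hr⟩ := hpre
      rw [List.getD_eq_getElem?_getD, ← List.head?_drop, ← hr, hc]
      rfl
    exact ⟨i, hi, s.toList, ⟨hmem, by rw [hc, hhead]; rfl⟩, hpre⟩
  · rintro ⟨i, hi, p, ⟨hp, _⟩, hpre⟩
    have hin : p <:+: t := List.infix_iff_prefix_suffix.mpr ⟨t.drop i, hpre, List.drop_suffix i t⟩
    simp only [pvPatterns, List.mem_cons, List.not_mem_nil, or_false] at hp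
    rcases hp with rfl|rfl|rfl|rfl|rfl|rfl|rfl|rfl
    · exact ⟨"rate limit", .head _, hin⟩
    · exact ⟨"rate-limit", .tail _ (.head _), hin⟩
    · exact ⟨"quota", .tail _ (.tail _ (.head _)), hin⟩
    · exact ⟨"usage limit", .tail _ (.tail _ (.tail _ (.head _))), hin⟩
    · exact ⟨"too many requests", .tail _ (.tail _ (.tail _ (.tail _ (.head _)))), hin⟩
    · exact ⟨"429", .tail _ (.tail _ (.tail _ (.tail _ (.tail _ (.head _))))), hin⟩
    · exact ⟨"limit reached", .tail _ (.tail _ (.tail _ (.tail _ (.tail _ (.tail _ (.head _)))))), hin⟩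
    · exact ⟨"exceeded your current quota", .tail _ (.tail _ (.tail _ (.tail _ (.tail _ (.tail _ (.tail _ (.head _))))))), hin⟩
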